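/- GENERATED by farm/mkstatement.py from design/units.tsv (unit `DGifCloseFile.2`) and the assertions of Gif/Spec/Seg_DGifCloseFile.lean — do not edit.
   THE STATEMENT of the proof unit `DGifCloseFile.2`: segment 2 of `DGifCloseFile` (9 instructions; entries 0x109cb5;
   exits 0x109cdd; ranges 0x109cb5-0x109cdd)
   takes each of its entry assertions to one of its exit assertions (`Gif.Spec.DGifCloseFile.Seg2`), given the contracts of its callees.
   What the names mean: ProgX/Base/Spec/Basic.lean (the shared hypotheses), Gif/Spec/Seg_DGifCloseFile.lean (the assertions). The theorem to prove:
   `theorem DGifCloseFile_2_ok : Gif.Spec.DGifCloseFile_2.Statement`. -/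
import Gif.Code
import Gif.Dec.All
import Gif.Labels
import Gif.Spec.Alloc
import Gif.Spec.Seg_DGifCloseFile
namespace Gif.Spec.DGifCloseFile_2
open X86 X86.User Asan

/-- The statement of unit `DGifCloseFile.2`. -/
def Statement : Prop :=
  ∀ (Lay : Layout) (_hLay : Lay.hi = 0x1000000) (μ : Microarch) (_hμ : UserX.MicroOK μ) (u₀ : State)
    (_hcode : HasCodeNat Lay u₀ Gif.L.DGifCloseFile.entry Gif.Code.code_DGifCloseFile.nat Gif.L.DGifCloseFile.size)
    (_h_asan_load8_noabort : Asan.SmallCheck Lay μ ProgX.Base.WayInv (ProgX.Base.CodeOK u₀) [.rax, .rcx, .rdx] 8 ProgX.Base.L.__asan_load8_noabort.entry)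
    (_h_GifFreeMapObject : ∀ (H : Heap) (rest : List Obj) (frames : List (Nat × FrameLayout)) (colors n : Nat), Calls Lay μ ProgX.Base.WayInv (ProgX.Base.conv u₀) Gif.L.GifFreeMapObject.entry (Gif.Spec.GifFreeMapObject.spec H rest frames colors n))
    (_h_asan_store8_noabort : Asan.SmallCheck Lay μ ProgX.Base.WayInv (ProgX.Base.CodeOK u₀) [.rax, .rcx, .rdx] 8 ProgX.Base.L.__asan_store8_noabort.entry),
    Gif.Spec.DGifCloseFile.Seg2 Lay μ u₀

end Gif.Spec.DGifCloseFile_2
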